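-- pv_equiv track=rewrite | github.com/Akastan/vibe-testing-framework-dp | context_compressor.py | compress_db_schema
-- ===== SOURCE A (Python) =====
-- def compress_db_schema(schema: str) -> str:
--     """Strip komentáře a prázdné řádky z SQL schématu."""
--     lines = schema.split("\n")
--     result = []
--     blank_count = 0
--
--     for line in lines:
--         stripped = line.strip()
--
--         if stripped.startswith("--"):
--             continue
--
--         if stripped == "":
--             blank_count += 1
--             if blank_count <= 1:
--                 result.append("")
--             continue
--
--         blank_count = 0
--         result.append(line)
--
--     return "\n".join(result).strip()
-- ===== SOURCE B (Python) =====
-- def compress_db_schema(schema: str) -> str: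
--     """Strip komentáře a prázdné řádky z SQL schématu."""
--     kept = [line for line in schema.split("\n")
--             if not line.strip().startswith("--")]
--     out = []
--     i = 0
--     while i < len(kept):
--         if kept[i].strip() == "":
--             out.append("")
--             while i < len(kept) and kept[i].strip() == "":
--                 i += 1
--         else:
--             out.append(kept[i])
--             i += 1
--     return "\n".join(out).strip()
-- ===== Notes on version B (the rewrite author's own statement) =====
-- stated objective: alternative
-- what changed: Replaces A's single interleaved loop with a manual blank_count counter by a two-pass decomposition: first filter out comment lines, then collapse each run of blank lines to one empty line with an index/run scan.
import Mathlib
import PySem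

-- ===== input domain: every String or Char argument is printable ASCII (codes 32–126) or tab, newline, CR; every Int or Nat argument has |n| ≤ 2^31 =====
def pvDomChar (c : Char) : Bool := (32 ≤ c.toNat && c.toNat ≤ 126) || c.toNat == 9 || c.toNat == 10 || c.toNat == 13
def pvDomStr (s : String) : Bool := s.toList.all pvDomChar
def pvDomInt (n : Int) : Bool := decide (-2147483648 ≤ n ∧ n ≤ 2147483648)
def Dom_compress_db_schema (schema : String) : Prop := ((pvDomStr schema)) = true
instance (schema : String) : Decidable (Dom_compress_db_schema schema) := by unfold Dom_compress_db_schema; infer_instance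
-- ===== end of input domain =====

-- B collapses blank runs in two passes (filter comments, then run-collapse) instead of A's counter loop; same output.

-- ===== PORT A =====
-- A's loop over the lines: state is blank_count; result lines are emitted in order.
def pvALoop : List String → Nat → List String
  | [], _ => []
  | l :: ls, bc =>
    let stripped := PySem.Str.strip l
    if PySem.Str.startswith stripped "--" then pvALoop ls bc
    else if stripped = "" then
      (if bc + 1 ≤ 1 then [""] else []) ++ pvALoop ls (bc + 1)
    else l :: pvALoop ls 0

def compress_db_schema (schema : String) : String :=
  let lines := (PySem.Str.split? schema "\n").getD []
  PySem.Str.strip (PySem.Str.join "\n" (pvALoop lines 0))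

-- ===== PORT B =====
-- B's second pass: one '' per blank run (the inner while = dropWhile), non-blank lines kept.
def pvBlank (l : String) : Bool := PySem.Str.strip l == ""

def pvCollapse : List String → List String
  | [] => []
  | l :: ls =>
    if pvBlank l then
      "" :: pvCollapse (ls.dropWhile pvBlank)
    else l :: pvCollapse ls
termination_by ls => ls.length
decreasing_by
  · exact Nat.lt_succ_of_le (ls.length_dropWhile_le pvBlank)
  · simp

def compress_db_schema_alt (schema : String) : String :=
  let kept := ((PySem.Str.split? schema "\n").getD []).filter
      (fun l => !(PySem.Str.startswith (PySem.Str.strip l) "--"))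
  PySem.Str.strip (PySem.Str.join "\n" (pvCollapse kept))

-- ===== PRECONDITION & SPEC =====
def Spec_compress_db_schema (schema : String) (out : String) : Prop := out = compress_db_schema_alt schema
instance (schema : String) (out : String) : Decidable (Spec_compress_db_schema schema out) := by unfold Spec_compress_db_schema; infer_instance

-- ===== CLAIM (what is proved, stated in full; the proofs are below) =====
def Claim_equal_compress_db_schema : Prop := ∀ (schema : String), Dom_compress_db_schema schema → Spec_compress_db_schema schema (compress_db_schema schema)

-- ===== LEMMAS AND PROOFS =====
-- A's counted loop equals B's collapse of the comment-filtered list; bc > 0 means "inside a blank run".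
theorem pvALoop_eq_collapse (ls : List String) : ∀ bc : Nat,
    pvALoop ls bc =
      (if bc = 0 then
        pvCollapse (ls.filter (fun l => !(PySem.Str.startswith (PySem.Str.strip l) "--")))
       else
        pvCollapse ((ls.filter (fun l => !(PySem.Str.startswith (PySem.Str.strip l) "--"))).dropWhile pvBlank)) := by
  induction ls with
  | nil => intro bc; simp [pvALoop, pvCollapse]
  | cons l ls ih =>
    intro bc
    simp only [pvALoop, List.filter_cons]
    cases hc : PySem.Str.startswith (PySem.Str.strip l) "--" with
    | true =>
      rw [if_pos (rfl : (true = true)), if_neg (by decide : ¬ ((!true) = true))]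
      exact ih bc
    | false =>
      rw [if_neg (by decide : ¬ (false = true)), if_pos (by decide : (!false) = true)]
      by_cases hb : PySem.Str.strip l = ""
      · have hb' : pvBlank l = true := by simp [pvBlank, hb]
        rw [if_pos hb]
        rcases Nat.eq_zero_or_pos bc with h0 | hpos
        · subst h0
          rw [if_pos (by omega : 0 + 1 ≤ 1), if_pos rfl, ih 1, if_neg (by omega : ¬ (1 : Nat) = 0)]
          simp only [pvCollapse, hb', List.singleton_append]
          rw [if_pos trivial]
        · rw [if_neg (by omega : ¬ bc + 1 ≤ 1), ih (bc + 1), if_neg (by omega : ¬ bc + 1 = 0),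
              if_neg (by omega : ¬ bc = 0), List.dropWhile_cons_of_pos hb', List.nil_append]
      · have hb' : pvBlank l = false := by simp [pvBlank, hb]
        rw [if_neg hb, ih 0, if_pos rfl]
        rcases Nat.eq_zero_or_pos bc with h0 | hpos
        · subst h0
          rw [if_pos rfl]
          simp only [pvCollapse, hb', Bool.false_eq_true, if_neg (fun h => h)]
        · rw [if_neg (by omega : ¬ bc = 0), List.dropWhile_cons_of_neg (by simp [hb'])]
          simp only [pvCollapse, hb', Bool.false_eq_true, if_neg (fun h => h)]

-- ===== VERDICT (by name: the statement is the Claim_ definition above) =====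
theorem compress_db_schema_spec : Claim_equal_compress_db_schema := by
  intro schema _
  unfold Spec_compress_db_schema compress_db_schema compress_db_schema_alt
  simp [pvALoop_eq_collapse]
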